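-- pv_equiv track=rewrite | github.com/bhi5hmaraj/APRG-2020 | Assignment 4/truck_driving_solutions/BMC201927/BMC201927.py | make_intlog
-- ===== SOURCE A (Python) =====
-- def make_intlog(xxx):
--     intlog = [0,0]
--     k = 1
--     pow2k = 2
--     while pow2k < xxx:
--         intlog += ([k]*pow2k)
--         k += 1
--         pow2k *= 2
--     return intlog
-- ===== SOURCE B (Python) =====
-- def make_intlog(xxx):
--     L = 2
--     while L < xxx:
--         L *= 2
--     return [0] + [i.bit_length() - 1 for i in range(1, L)]
-- ===== Notes on version B (the rewrite author's own statement) =====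
-- stated objective: alternative
-- what changed: B first computes only the final table length L with the doubling guard loop, then fills the table element-wise via floor(log2(i)) = i.bit_length()-1, instead of A's appending of geometric blocks [k]*2^k while doubling.
import Mathlib
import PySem

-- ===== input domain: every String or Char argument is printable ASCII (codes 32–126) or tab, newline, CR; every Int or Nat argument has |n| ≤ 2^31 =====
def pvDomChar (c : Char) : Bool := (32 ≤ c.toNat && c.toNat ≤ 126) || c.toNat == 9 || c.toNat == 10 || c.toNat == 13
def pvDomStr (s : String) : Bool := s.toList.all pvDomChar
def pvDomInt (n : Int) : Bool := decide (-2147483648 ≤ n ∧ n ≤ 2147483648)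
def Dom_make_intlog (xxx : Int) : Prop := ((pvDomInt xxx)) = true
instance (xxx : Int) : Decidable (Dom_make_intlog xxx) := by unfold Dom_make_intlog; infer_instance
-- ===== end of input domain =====

-- B builds the same floor(log2) table element-wise from the precomputed final length instead of appending geometric blocks (alternative decomposition, same cost).

-- ===== PORT A =====
-- while pow2k < xxx: intlog += [k]*pow2k; k += 1; pow2k *= 2
-- (0 < pow2k is an invariant of A's loop, carried only to justify termination)
def mkLoopA (xxx : Int) (intlog : List Int) (k : Int) (pow2k : Int) (hp : 0 < pow2k) : List Int :=
  if h : pow2k < xxx then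
    mkLoopA xxx (intlog ++ List.replicate pow2k.toNat k) (k + 1) (pow2k * 2) (by omega)
  else intlog
termination_by (xxx - pow2k).toNat
decreasing_by omega

def make_intlog (xxx : Int) : List Int := mkLoopA xxx [0, 0] 1 2 (by norm_num)

-- ===== PORT B =====
-- L = 2; while L < xxx: L *= 2
def lenLoopB (xxx : Int) (L : Int) (hp : 0 < L) : Int :=
  if h : L < xxx then lenLoopB xxx (L * 2) (by omega) else L
termination_by (xxx - L).toNat
decreasing_by omega

-- Python's n.bit_length(); exact for n ≥ 1, the only inputs B applies it to
def pyBitLength (n : Int) : Int := Int.ofNat (Nat.log2 n.toNat + 1)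

-- [0] + [i.bit_length() - 1 for i in range(1, L)]
def make_intlog_alt (xxx : Int) : List Int :=
  0 :: (PySem.List.pyRange 1 (lenLoopB xxx 2 (by norm_num)) 1).map (fun i => pyBitLength i - 1)

-- ===== PRECONDITION & SPEC =====
def Spec_make_intlog (xxx : Int) (out : List Int) : Prop := out = make_intlog_alt xxx
instance (xxx : Int) (out : List Int) : Decidable (Spec_make_intlog xxx out) := by unfold Spec_make_intlog; infer_instance

-- ===== CLAIM (what is proved, stated in full; the proofs are below) =====
def Claim_equal_make_intlog : Prop := ∀ (xxx : Int), Dom_make_intlog xxx → Spec_make_intlog xxx (make_intlog xxx)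

-- ===== LEMMAS AND PROOFS =====

-- the table of length L that B builds
def tbl (L : Int) : List Int :=
  0 :: (PySem.List.pyRange 1 L 1).map (fun i => pyBitLength i - 1)

lemma bitLength_of_between (m : Nat) (n : Int) (h1 : (2 : Int) ^ m ≤ n) (h2 : n < (2 : Int) ^ (m + 1)) :
    pyBitLength n - 1 = (m : Int) := by
  have hpow : ((2 ^ m : Nat) : Int) = (2 : Int) ^ m := by push_cast; ring
  have hpow' : ((2 ^ (m + 1) : Nat) : Int) = (2 : Int) ^ (m + 1) := by push_cast; ring
  have hn : (2 : Nat) ^ m ≤ n.toNat ∧ n.toNat < 2 ^ (m + 1) := by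
    constructor <;> omega
  have hlog : Nat.log2 n.toNat = m := by
    rw [Nat.log2_eq_log_two]
    exact Nat.log_eq_of_pow_le_of_lt_pow hn.1 hn.2
  simp [pyBitLength, hlog]

lemma mkLoopA_congr (xxx : Int) {acc acc' k k' p p' : _} (h1 : acc = acc') (h2 : k = k')
    (h3 : p = p') (hp : 0 < p) (hp' : 0 < p') :
    mkLoopA xxx acc k p hp = mkLoopA xxx acc' k' p' hp' := by
  subst h1; subst h2; subst h3; rfl

lemma lenLoopB_congr (xxx : Int) {L L' : Int} (h3 : L = L') (hp : 0 < L) (hp' : 0 < L') :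
    lenLoopB xxx L hp = lenLoopB xxx L' hp' := by
  subst h3; rfl

lemma tbl_step (m : Nat) :
    tbl ((2 : Int) ^ (m + 1)) = tbl ((2 : Int) ^ m) ++ List.replicate ((2 : Int) ^ m).toNat (m : Int) := by
  have h1 : (1 : Int) ≤ (2 : Int) ^ m := one_le_pow₀ (by norm_num)
  have e : (2 : Int) ^ (m + 1) = (2 : Int) ^ m * 2 := pow_succ 2 m
  have h2 : (2 : Int) ^ m ≤ (2 : Int) ^ (m + 1) := by omega
  unfold tbl
  rw [PySem.List.pyRange_one_append 1 ((2:Int)^m) ((2:Int)^(m+1)) h1 h2, List.map_append]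
  simp only [List.cons_append]
  congr 1
  congr 1
  -- map over [2^m, 2^(m+1)) of the constant value m
  rw [PySem.List.pyRange_one, List.map_map]
  apply List.eq_replicate_iff.2
  constructor
  · simp [List.length_range]
    omega
  · intro b hb
    simp only [List.mem_map, List.mem_range] at hb
    obtain ⟨k, hk, rfl⟩ := hb
    have hk' : (k : Int) < (2:Int) ^ m := by omega
    exact bitLength_of_between m ((2:Int)^m + k) (by omega) (by omega)

lemma key (N : Nat) : ∀ (xxx : Int) (m : Nat) (hp : 0 < (2 : Int) ^ m) (hp2 : 0 < (2 : Int) ^ m),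
    (xxx - 2 ^ m).toNat ≤ N →
    mkLoopA xxx (tbl ((2 : Int) ^ m)) (m : Int) ((2 : Int) ^ m) hp = tbl (lenLoopB xxx ((2 : Int) ^ m) hp2) := by
  induction N with
  | zero =>
    intro xxx m hp hp2 hN
    have hno : ¬ ((2:Int) ^ m < xxx) := by omega
    rw [mkLoopA, lenLoopB]
    simp [hno]
  | succ n ih =>
    intro xxx m hp hp2 hN
    rw [mkLoopA, lenLoopB]
    by_cases h : (2:Int) ^ m < xxx
    · simp only [h, dif_pos]
      have e : (2:Int) ^ (m + 1) = (2:Int) ^ m * 2 := pow_succ 2 m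
      rw [mkLoopA_congr xxx (tbl_step m).symm (by push_cast; ring : (m:Int)+1 = ((m+1:Nat):Int))
            e.symm (by omega) (by positivity)]
      rw [lenLoopB_congr xxx e.symm (by omega) (by positivity)]
      exact ih xxx (m+1) (by positivity) (by positivity) (by omega)
    · simp [h]

theorem make_intlog_eq (xxx : Int) : make_intlog xxx = make_intlog_alt xxx := by
  have hkey := key (xxx - 2).toNat xxx 1 (by norm_num) (by norm_num) (by norm_num)
  rw [mkLoopA_congr xxx (show tbl ((2:Int)^1) = [0,0] by decide)
        (by norm_num : ((1:Nat):Int) = 1) (by norm_num : (2:Int)^1 = 2) (by norm_num) (by norm_num)] at hkey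
  rw [lenLoopB_congr xxx (by norm_num : (2:Int)^1 = 2) (by norm_num) (by norm_num)] at hkey
  unfold make_intlog make_intlog_alt
  simpa [tbl] using hkey

-- ===== VERDICT (by name: the statement is the Claim_ definition above) =====
theorem make_intlog_spec : Claim_equal_make_intlog := by
  intro xxx _
  exact make_intlog_eq xxx
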